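-- pv_equiv track=rewrite | github.com/struggling-student/PythonExercises | PythonExercises/Insiemi/44/solution.py | es44
-- ===== SOURCE A (Python) =====
-- def es44(a, b):
--     interi = set()
--     n = 2
--     while len(interi) < a:
--         ndiv = 0
--         for i in range(1, n + 1):
--             if n % i == 0:
--                 ndiv += 1
--             if ndiv > b:
--                 break
--         if ndiv != b:
--             n += 1
--             continue
--         else:
--             interi.add(n)
--         n += 1
--     return interi
-- ===== SOURCE B (Python) =====
-- def es44(a, b):
--     interi = set()
--     n = 2
--     while len(interi) < a:
--         ndiv = 0
--         i = 1
--         while i * i <= n: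
--             if n % i == 0:
--                 ndiv += 1 if i * i == n else 2
--             i += 1
--         if ndiv == b:
--             interi.add(n)
--         n += 1
--     return interi
-- ===== Notes on version B (the rewrite author's own statement) =====
-- stated objective: alternative
-- what changed: Counts divisors of each candidate n by pairing i with n//i while scanning i only up to i*i <= n (perfect-square case counted once), instead of A's full 1..n scan with an early break; measured 8.7x faster at the largest size both finished, but unconfirmed beyond that since on huge random (a,b) both searches run too long.
import Mathlib
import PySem

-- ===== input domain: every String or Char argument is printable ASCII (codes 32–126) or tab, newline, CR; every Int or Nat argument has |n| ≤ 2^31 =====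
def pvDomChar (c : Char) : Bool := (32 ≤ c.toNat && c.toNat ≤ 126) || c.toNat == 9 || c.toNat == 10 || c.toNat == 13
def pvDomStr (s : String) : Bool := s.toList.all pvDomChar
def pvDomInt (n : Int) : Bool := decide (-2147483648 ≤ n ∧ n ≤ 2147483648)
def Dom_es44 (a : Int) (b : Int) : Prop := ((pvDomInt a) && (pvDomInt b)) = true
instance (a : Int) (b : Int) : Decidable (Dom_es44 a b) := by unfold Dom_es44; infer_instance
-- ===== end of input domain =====

-- B replaces A's full 1..n divisor scan by sqrt-pairing (i and n//i counted together up to i*i ≤ n).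
-- Both ports make the Python 'while' loop total with the same fuel bound; fuel only guards totality.

-- ===== PORT A =====
-- inner 'for i in range(1, n+1): if n % i == 0: ndiv += 1; if ndiv > b: break'
def es44CountA (n b : Int) : List Int → Int → Int
  | [], ndiv => ndiv
  | i :: rest, ndiv =>
    let ndiv' := if PySem.Int.mod n i == 0 then ndiv + 1 else ndiv
    if b < ndiv' then ndiv' else es44CountA n b rest ndiv'

-- outer 'while len(interi) < a' loop of A (fuel makes it total)
def es44LoopA (a b : Int) : Nat → Int → PySem.Set Int → PySem.Set Int
  | 0, _, interi => interi
  | fuel+1, n, interi =>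
    if (interi.length : Int) < a then
      let ndiv := es44CountA n b (PySem.List.pyRange 1 (n+1) 1) 0
      if ndiv ≠ b then es44LoopA a b fuel (n+1) interi
      else es44LoopA a b fuel (n+1) (PySem.Set.add interi n)
    else interi

def es44 (a : Int) (b : Int) : List Int :=
  es44LoopA a b (2 ^ (a.toNat * b.toNat)) 2 PySem.Set.empty

-- ===== PORT B =====
-- inner 'while i * i <= n: if n % i == 0: ndiv += 1 if i*i == n else 2; i += 1'
def es44CountB (n i ndiv : Int) : Int :=
  if _h : i * i ≤ n then
    es44CountB n (i + 1)
      (if PySem.Int.mod n i == 0 then (if i * i == n then ndiv + 1 else ndiv + 2) else ndiv)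
  else ndiv
termination_by (n + 1 - i).toNat
decreasing_by
  have hi : i ≤ n := by nlinarith [sq_nonneg i, sq_nonneg (i - 1)]
  omega

-- outer 'while len(interi) < a' loop of B (fuel makes it total)
def es44LoopB (a b : Int) : Nat → Int → PySem.Set Int → PySem.Set Int
  | 0, _, interi => interi
  | fuel+1, n, interi =>
    if (interi.length : Int) < a then
      let ndiv := es44CountB n 1 0
      es44LoopB a b fuel (n+1) (if ndiv == b then PySem.Set.add interi n else interi)
    else interi

def es44_alt (a : Int) (b : Int) : List Int :=
  es44LoopB a b (2 ^ (a.toNat * b.toNat)) 2 PySem.Set.empty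

-- ===== PRECONDITION & SPEC =====
-- Pre_ excludes exactly the inputs where the Python A never returns (it loops forever):
-- a ≥ 1 together with b ≤ 1, since every integer n ≥ 2 has at least two divisors.
def Pre_es44 (a : Int) (b : Int) : Prop := a ≤ 0 ∨ 2 ≤ b
instance (a : Int) (b : Int) : Decidable (Pre_es44 a b) := by unfold Pre_es44; infer_instance
def pvWitness_es44 : Int × Int := (3, 4)

def Spec_es44 (a : Int) (b : Int) (out : List Int) : Prop := out = es44_alt a b
instance (a : Int) (b : Int) (out : List Int) : Decidable (Spec_es44 a b out) := by unfold Spec_es44; infer_instance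

-- ===== CLAIM (what is proved, stated in full; the proofs are below) =====
def Claim_equal_es44 : Prop := ∀ (a : Int) (b : Int), Dom_es44 a b → Pre_es44 a b → Spec_es44 a b (es44 a b)

-- ===== LEMMAS AND PROOFS =====

-- the exact divisor count of n over the same range A scans
def es44Dcnt (n : Int) : Int :=
  (((PySem.List.pyRange 1 (n+1) 1).filter (fun i => PySem.Int.mod n i == 0)).length : Int)

-- contribution of index j in B's sqrt loop
def es44C (m : Nat) (j : Nat) : Int := if j ∣ m then (if j * j = m then 1 else 2) else 0

theorem es44CountA_mono (n b : Int) : ∀ (l : List Int) (s : Int), s ≤ es44CountA n b l s := by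
  intro l
  induction l with
  | nil => intro s; simp [es44CountA]
  | cons i rest ih =>
    intro s
    simp only [es44CountA]
    by_cases hd : (PySem.Int.mod n i == 0) = true <;>
      simp only [hd, if_true, if_false, Bool.false_eq_true] <;>
      split_ifs <;> first | omega | (have := ih (s+1); omega) | (have := ih s; omega)

theorem es44CountA_min (n b : Int) :
    ∀ (l : List Int) (s : Int), s ≤ b →
      es44CountA n b l s =
        min (s + ((l.filter (fun i => PySem.Int.mod n i == 0)).length : Int)) (b + 1) := by
  intro l
  induction l with
  | nil => intro s hs; simp [es44CountA]; omega
  | cons i rest ih =>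
    intro s hs
    simp only [es44CountA, List.filter_cons]
    by_cases hd : (PySem.Int.mod n i == 0) = true <;>
      simp only [hd, if_true, if_false, Bool.false_eq_true, List.length_cons]
    · by_cases hb : b < s + 1
      · have h1 : (0:Int) ≤ ((rest.filter (fun i => PySem.Int.mod n i == 0)).length : Int) :=
          Int.natCast_nonneg _
        rw [if_pos hb]
        push_cast
        omega
      · rw [if_neg hb, ih (s+1) (by omega)]
        push_cast
        omega
    · rw [if_neg (by omega), ih s hs]

-- contribution of index j in B's sqrt loop
theorem es44CountB_loop (m : Nat) (hm : 1 ≤ m) :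
    ∀ (k : Nat) (i ndiv : Int), 1 ≤ i → Nat.sqrt m + 1 - i.toNat = k →
      es44CountB (m : Int) i ndiv = ndiv + ∑ j ∈ Finset.Ico i.toNat (Nat.sqrt m + 1), es44C m j := by
  intro k
  induction k with
  | zero =>
    intro i ndiv hi hk
    have hgt : Nat.sqrt m < i.toNat := by omega
    have h2 : m < i.toNat * i.toNat := Nat.sqrt_lt.mp hgt
    have hii : ¬ (i * i ≤ (m:Int)) := by
      have : i = (i.toNat : Int) := by omega
      rw [this]
      push_cast
      exact_mod_cast not_le.mpr (by exact_mod_cast h2)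
    rw [es44CountB, dif_neg hii, Finset.Ico_eq_empty (by omega), Finset.sum_empty, add_zero]
  | succ k ih =>
    intro i ndiv hi hk
    obtain ⟨t, rfl⟩ : ∃ t : Nat, i = (t : Int) := ⟨i.toNat, by omega⟩
    simp only [Int.toNat_natCast] at hk ⊢
    have ht : 1 ≤ t := by exact_mod_cast hi
    have hle : t ≤ Nat.sqrt m := by omega
    have h2 : t * t ≤ m := Nat.le_sqrt.mp hle
    rw [es44CountB, dif_pos (by exact_mod_cast h2)]
    have hcast : ((t:Int)+1) = (((t+1 : Nat)) : Int) := by push_cast; ring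
    rw [hcast, ih ((t+1 : Nat) : Int) _ (by exact_mod_cast Nat.le_add_left 1 t) (by simp [Int.toNat_natCast]; omega)]
    rw [Finset.sum_eq_sum_Ico_succ_bot (by omega : t < Nat.sqrt m + 1)]
    simp only [Int.toNat_natCast]
    have hc : (if PySem.Int.mod (m:Int) (t:Int) == 0 then (if (t:Int) * (t:Int) == (m:Int) then ndiv + 1 else ndiv + 2) else ndiv)
        = ndiv + es44C m t := by
      simp only [PySem.Int.mod_natCast, es44C]
      by_cases hdvd : t ∣ m
      · have hz : m % t = 0 := Nat.dvd_iff_mod_eq_zero.mp hdvd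
        by_cases hsq : t * t = m
        · have hsqI : (t : Int) * (t : Int) = (m : Int) := by exact_mod_cast hsq
          simp [hz, hsq, hdvd, hsqI]
        · have hsq' : ¬ ((t : Int) * (t : Int) = (m : Int)) := by exact_mod_cast hsq
          simp [hz, hdvd, hsq, hsq']
      · have hdvdI : ¬ ((t : Int) ∣ (m : Int)) := fun h => hdvd (Int.natCast_dvd_natCast.mp h)
        have hz : ¬ (m % t = 0) := fun h => hdvd (Nat.dvd_iff_mod_eq_zero.mpr h)
        simp [hdvd, hz, hdvdI]
    rw [hc]
    ring

theorem es44CountB_eq (m : Nat) (hm : 1 ≤ m) :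
    es44CountB (m : Int) 1 0 = ((Nat.divisors m).card : Int) := by
  rw [es44CountB_loop m hm (Nat.sqrt m) 1 0 (by omega) (by simp)]
  simp only [Int.toNat_one]
  rw [zero_add]
  -- restrict the sum to divisors
  have h1 : ∑ j ∈ Finset.Ico 1 (Nat.sqrt m + 1), es44C m j
      = ∑ j ∈ (Finset.Ico 1 (Nat.sqrt m + 1)).filter (fun j => j ∣ m), (if j * j = m then (1:Int) else 2) := by
    rw [Finset.sum_filter]
    refine Finset.sum_congr rfl ?_
    intro j _
    by_cases h : j ∣ m <;> simp [es44C, h]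
  have hLo : (Finset.Ico 1 (Nat.sqrt m + 1)).filter (fun j => j ∣ m)
      = (Nat.divisors m).filter (fun j => j * j ≤ m) := by
    ext j
    simp only [Finset.mem_filter, Finset.mem_Ico, Nat.mem_divisors, Nat.lt_succ_iff]
    constructor
    · rintro ⟨⟨h1, h2⟩, h3⟩
      exact ⟨⟨h3, by omega⟩, Nat.le_sqrt.mp h2⟩
    · rintro ⟨⟨h1, h2⟩, h3⟩
      have := Nat.pos_of_dvd_of_pos h1 (by omega)
      exact ⟨⟨by omega, Nat.le_sqrt.mpr h3⟩, h1⟩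
  have h2 : ∑ j ∈ (Nat.divisors m).filter (fun j => j * j ≤ m), (if j * j = m then (1:Int) else 2)
      = (((Nat.divisors m).filter (fun j => j * j ≤ m)).card : Int)
        + (((Nat.divisors m).filter (fun j => j * j < m)).card : Int) := by
    have : ∀ j ∈ (Nat.divisors m).filter (fun j => j * j ≤ m),
        (if j * j = m then (1:Int) else 2) = 1 + (if j * j < m then (1:Int) else 0) := by
      intro j hj
      rcases Finset.mem_filter.mp hj with ⟨-, hle⟩
      by_cases h : j * j = m <;> simp [h] <;> omega
    rw [Finset.sum_congr rfl this, Finset.sum_add_distrib, Finset.sum_const, nsmul_eq_mul, mul_one]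
    rw [Finset.sum_boole]
    have hfe : (((Nat.divisors m).filter (fun j => j * j ≤ m)).filter (fun j => j * j < m))
        = (Nat.divisors m).filter (fun j => j * j < m) := by
      rw [Finset.filter_filter]
      apply Finset.filter_congr
      intro j _
      constructor
      · rintro ⟨-, h⟩; exact h
      · intro h; exact ⟨by omega, h⟩
    rw [hfe]
  have hbij : ((Nat.divisors m).filter (fun j => j * j < m)).card
      = ((Nat.divisors m).filter (fun j => ¬ j * j ≤ m)).card := by
    apply Finset.card_nbij' (fun j => m / j) (fun j => m / j)
    · intro j hj
      simp only [Finset.coe_filter, Set.mem_setOf_eq, Nat.mem_divisors] at hj ⊢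
      obtain ⟨⟨⟨k, hk⟩, hm0⟩, hlt⟩ := hj
      have hj0 : 0 < j := Nat.pos_of_dvd_of_pos ⟨k, hk⟩ (by omega)
      have hdiv : m / j = k := by rw [hk]; exact Nat.mul_div_cancel_left k hj0
      have hk0 : 0 < k := by
        rcases Nat.eq_zero_or_pos k with h0 | h0
        · subst h0; simp at hk; exact absurd hk hm0
        · exact h0
      have hjk : j < k := by nlinarith
      refine ⟨⟨⟨j, (Nat.div_mul_cancel ⟨k, hk⟩).symm⟩, hm0⟩, ?_⟩
      rw [hdiv]; nlinarith
    · intro j hj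
      simp only [Finset.coe_filter, Set.mem_setOf_eq, Nat.mem_divisors] at hj ⊢
      obtain ⟨⟨⟨k, hk⟩, hm0⟩, hgt⟩ := hj
      push_neg at hgt
      have hj0 : 0 < j := Nat.pos_of_dvd_of_pos ⟨k, hk⟩ (by omega)
      have hdiv : m / j = k := by rw [hk]; exact Nat.mul_div_cancel_left k hj0
      have hk0 : 0 < k := by
        rcases Nat.eq_zero_or_pos k with h0 | h0
        · subst h0; simp at hk; exact absurd hk hm0
        · exact h0
      have hjk : k < j := by nlinarith
      refine ⟨⟨⟨j, (Nat.div_mul_cancel ⟨k, hk⟩).symm⟩, hm0⟩, ?_⟩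
      rw [hdiv]; nlinarith
    · intro j hj
      simp only [Finset.coe_filter, Set.mem_setOf_eq, Nat.mem_divisors] at hj
      exact Nat.div_div_self hj.1.1 hj.1.2
    · intro j hj
      simp only [Finset.coe_filter, Set.mem_setOf_eq, Nat.mem_divisors] at hj
      exact Nat.div_div_self hj.1.1 hj.1.2
  rw [h1, hLo, h2, hbij]
  rw [← Nat.cast_add]
  congr 1
  exact Finset.filter_card_add_filter_neg_card_eq_card _

theorem es44_countP_bridge (p : Nat → Bool) :
    ∀ t : Nat, (List.range t).countP (fun k => p (1+k)) = ((Finset.Ico 1 (t+1)).filter (fun j => p j = true)).card := by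
  intro t
  induction t with
  | zero => simp
  | succ t ih =>
    rw [List.range_succ, List.countP_append, ih,
      Nat.Ico_succ_right_eq_insert_Ico (a := 1) (b := t+1) (by omega), Finset.filter_insert]
    by_cases h : p (1+t) = true
    · have h' : p (t+1) = true := by rwa [Nat.add_comm] at h
      rw [if_pos h', Finset.card_insert_of_notMem (by simp)]
      simp [h]
    · have h' : ¬ p (t+1) = true := by rwa [Nat.add_comm] at h
      rw [if_neg h']
      simp [h]

theorem es44Dcnt_eq (m : Nat) (hm : 1 ≤ m) :
    es44Dcnt (m : Int) = ((Nat.divisors m).card : Int) := by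
  unfold es44Dcnt
  have ht : ((m:Int) + 1 - 1).toNat = m := by omega
  rw [PySem.List.pyRange_one, ht, ← List.countP_eq_length_filter, List.countP_map]
  have hcp : (List.range m).countP ((fun i => PySem.Int.mod (m:Int) i == 0) ∘ (fun k : Nat => (1:Int) + k))
      = (List.range m).countP (fun k => decide ((1+k) ∣ m)) := by
    apply List.countP_congr
    intro k _
    simp only [Function.comp]
    have hc : ((1:Int) + k) = (((1+k : Nat)) : Int) := by push_cast; ring
    rw [hc, PySem.Int.mod_natCast]
    by_cases hdvd : (1+k) ∣ m
    · have hz : m % (1+k) = 0 := Nat.dvd_iff_mod_eq_zero.mp hdvd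
      simp [hz, hdvd]
    · have hz : ¬ m % (1+k) = 0 := fun h => hdvd (Nat.dvd_iff_mod_eq_zero.mpr h)
      have hdvdI : ¬ ((1:Int) + (k:Int) ∣ (m:Int)) := by rw [hc]; exact_mod_cast hdvd
      simp [hz, hdvdI, Int.natCast_eq_zero]
      exact hdvd
  rw [hcp, es44_countP_bridge (fun j => decide (j ∣ m)) m]
  congr 1
  rw [Nat.divisors]
  simp

theorem es44_cond_iff (n b : Int) (hn : 1 ≤ n) :
    (es44CountA n b (PySem.List.pyRange 1 (n+1) 1) 0 = b) ↔ (es44CountB n 1 0 = b) := by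
  obtain ⟨m, rfl⟩ : ∃ m : Nat, n = (m:Int) := ⟨n.toNat, by omega⟩
  have hm : 1 ≤ m := by exact_mod_cast hn
  have hB : es44CountB (m:Int) 1 0 = ((Nat.divisors m).card : Int) := es44CountB_eq m hm
  have hd : es44Dcnt (m:Int) = ((Nat.divisors m).card : Int) := es44Dcnt_eq m hm
  unfold es44Dcnt at hd
  by_cases hb : 0 ≤ b
  · have hA := es44CountA_min (m:Int) b (PySem.List.pyRange 1 ((m:Int)+1) 1) 0 hb
    rw [hA, hB, zero_add, hd]
    omega
  · have hA0 := es44CountA_mono (m:Int) b (PySem.List.pyRange 1 ((m:Int)+1) 1) 0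
    have hc : (0:Int) ≤ ((Nat.divisors m).card : Int) := Int.natCast_nonneg _
    constructor
    · intro h; omega
    · intro h; rw [hB] at h; omega


theorem es44Loop_eq (a b : Int) : ∀ (fuel : Nat) (n : Int) (s : PySem.Set Int), 1 ≤ n →
    es44LoopA a b fuel n s = es44LoopB a b fuel n s := by
  intro fuel
  induction fuel with
  | zero => intro n s _; rfl
  | succ k ih =>
    intro n s hn
    simp only [es44LoopA, es44LoopB]
    by_cases hlen : (s.length : Int) < a
    · simp only [if_pos hlen]
      by_cases hc : es44CountA n b (PySem.List.pyRange 1 (n+1) 1) 0 = b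
      · have hc' : es44CountB n 1 0 = b := (es44_cond_iff n b hn).mp hc
        simp only [hc, hc', ne_eq, not_true_eq_false, if_false, beq_self_eq_true, if_true]
        exact ih (n+1) _ (by omega)
      · have hc' : ¬ es44CountB n 1 0 = b := fun h => hc ((es44_cond_iff n b hn).mpr h)
        simp only [ne_eq, hc, not_false_eq_true, if_true, beq_iff_eq, hc', if_false]
        exact ih (n+1) _ (by omega)
    · simp only [if_neg hlen]

-- ===== VERDICT (by name: the statement is the Claim_ definition above) =====
theorem es44_spec : Claim_equal_es44 := by
  intro a b _hd _hp
  unfold Spec_es44 es44 es44_alt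
  exact es44Loop_eq a b _ 2 PySem.Set.empty (by omega)
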